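-- pv_equiv track=rewrite | github.com/sunjunee/offer_book_python_codes | codes/T61.py | judgePokers
-- ===== SOURCE A (Python) =====
-- def judgePokers(pokers):
--     # 0代表王，其实扑克是1-13的数字
--     pokers.sort()
--
--     numOfJoker = 0  # 王的个数
--     for p in pokers:
--         if(p == 0):
--             numOfJoker += 1
--
--     diff = 0
--     for i in range(numOfJoker, len(pokers)-1):
--         if(pokers[i] == pokers[i+1]):
--             return False
--
--         diff += pokers[i+1] - pokers[i] - 1
--
--     #判断
--     if(diff == 0):
--         return True
--     elif(diff == 1 and numOfJoker >= 1):
--         return True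
--     elif(diff == 2 and numOfJoker == 2):
--         return True
--     else:
--         return False
-- ===== SOURCE B (Python) =====
-- def judgePokers(pokers):
--     # Return-value equivalent to A; does NOT sort the argument in place (A does).
--     # Selection instead of sorting: drop one minimum per joker, then a set
--     # duplicate check and the min/max span decide the straight.
--     k = pokers.count(0)
--     rest = list(pokers)
--     for _ in range(k):
--         rest.remove(min(rest))
--     if not rest:
--         return True
--     if len(set(rest)) != len(rest):
--         return False
--     diff = max(rest) - min(rest) - (len(rest) - 1)
--     return diff == 0 or (diff == 1 and k >= 1) or (diff == 2 and k == 2)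
-- ===== Notes on version B (the rewrite author's own statement) =====
-- stated objective: alternative
-- what changed: B never sorts: it drops one minimum per joker by repeated min-extraction, rejects duplicates with a set, and decides via the closed-form span max-min-(len-1), replacing A's in-place sort plus index loop over adjacent sorted pairs; B also does not mutate its argument (A sorts it in place), the equivalence is about the return value.
import Mathlib
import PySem

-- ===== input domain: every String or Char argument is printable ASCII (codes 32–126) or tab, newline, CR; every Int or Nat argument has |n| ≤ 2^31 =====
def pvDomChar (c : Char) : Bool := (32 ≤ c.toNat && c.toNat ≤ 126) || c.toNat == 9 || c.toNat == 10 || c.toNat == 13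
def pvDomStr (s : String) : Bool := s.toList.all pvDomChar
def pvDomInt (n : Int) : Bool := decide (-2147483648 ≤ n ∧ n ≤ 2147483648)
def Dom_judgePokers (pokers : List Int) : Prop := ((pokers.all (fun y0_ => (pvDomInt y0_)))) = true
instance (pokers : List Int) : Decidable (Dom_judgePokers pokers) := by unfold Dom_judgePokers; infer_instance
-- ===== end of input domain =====

-- B never sorts: it extracts one minimum per joker, then a set duplicate check and the
-- min/max span decide; B does not mutate its argument (A sorts it in place) — the
-- equivalence proved here is about the return value only.

-- ===== PORT A =====

-- A's counting loop over the (sorted) list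
def countJokersA (s : List Int) : Nat :=
  s.foldl (fun n p => if p = 0 then n + 1 else n) 0

-- A's 'for i in range(numOfJoker, len(pokers)-1)' loop with its early 'return False'
-- (none = the early return); indices are always in range, so getD's default is never used.
def gapLoopA (s : List Int) (i : Nat) (diff : Int) : Option Int :=
  if i + 1 < s.length then
    if s.getD i 0 = s.getD (i + 1) 0 then none
    else gapLoopA s (i + 1) (diff + s.getD (i + 1) 0 - s.getD i 0 - 1)
  else some diff
termination_by s.length - i

def judgePokers (pokers : List Int) : Bool :=
  let s := PySem.List.sorted pokers (fun x => x) false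
  let numOfJoker := countJokersA s
  match gapLoopA s numOfJoker 0 with
  | none => false
  | some diff =>
    if diff = 0 then true
    else if diff = 1 ∧ 1 ≤ numOfJoker then true
    else if diff = 2 ∧ numOfJoker = 2 then true
    else false

-- ===== PORT B =====

-- B's 'for _ in range(k): rest.remove(min(rest))' loop; Python's min/remove raise on an
-- empty/missing argument, which never happens here (k = count of 0s ≤ len) — the
-- .getD/none fallbacks are unreachable (proved in the equivalence proof).
def removeMinsB : Nat → List Int → List Int
  | 0, rest => rest
  | n + 1, rest =>
    match PySem.List.min? rest (fun x => x) with
    | none => rest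
    | some m => removeMinsB n ((PySem.List.remove? rest m).getD rest)

def judgePokers_alt (pokers : List Int) : Bool :=
  let k := PySem.List.count pokers 0
  let rest := removeMinsB k pokers
  if rest = [] then true
  else if (PySem.Set.ofList rest).length ≠ rest.length then false
  else
    let diff : Int :=
      (PySem.List.max? rest (fun x => x)).getD 0
        - (PySem.List.min? rest (fun x => x)).getD 0 - ((rest.length : Int) - 1)
    decide (diff = 0 ∨ (diff = 1 ∧ 1 ≤ k) ∨ (diff = 2 ∧ k = 2))

-- ===== PRECONDITION & SPEC =====
def Spec_judgePokers (pokers : List Int) (out : Bool) : Prop := out = judgePokers_alt pokers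
instance (pokers : List Int) (out : Bool) : Decidable (Spec_judgePokers pokers out) := by unfold Spec_judgePokers; infer_instance

-- ===== CLAIM (what is proved, stated in full; the proofs are below) =====
def Claim_equal_judgePokers : Prop := ∀ (pokers : List Int), Dom_judgePokers pokers → Spec_judgePokers pokers (judgePokers pokers)

-- ===== LEMMAS AND PROOFS =====

-- pair-to-pair view of A's index loop, as structural recursion on the dropped tail
def pairView : List Int → Int → Option Int
  | a :: b :: rest, d => if a = b then none else pairView (b :: rest) (d + b - a - 1)
  | _, d => some d

theorem countJokersA_go (xs : List Int) : ∀ (n : Nat),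
    xs.foldl (fun n p => if p = 0 then n + 1 else n) n = n + List.count 0 xs := by
  induction xs with
  | nil => intro n; simp
  | cons x xs ih =>
    intro n
    simp only [List.foldl_cons, List.count_cons, ih]
    by_cases h : x = 0
    · simp [h]
      omega
    · simp [h]

theorem countJokersA_eq (s : List Int) : countJokersA s = List.count 0 s := by
  simpa using countJokersA_go s 0

theorem gapLoopA_eq_pairView (s : List Int) : ∀ (i : Nat) (d : Int),
    gapLoopA s i d = pairView (s.drop i) d := by
  intro i
  induction hn : s.length - i using Nat.strong_induction_on generalizing i with
  | _ n ih =>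
    intro d
    rw [gapLoopA]
    by_cases h : i + 1 < s.length
    · have hd : s.drop i = s[i] :: s[i+1] :: s.drop (i + 2) := by
        rw [List.drop_eq_getElem_cons (by omega), List.drop_eq_getElem_cons (by omega)]
      have hgi : s.getD i 0 = s[i] := List.getD_eq_getElem _ _ (by omega)
      have hgi1 : s.getD (i + 1) 0 = s[i+1] := List.getD_eq_getElem _ _ (by omega)
      have hd' : s.drop (i + 1) = s[i+1] :: s.drop (i + 2) := by
        rw [List.drop_eq_getElem_cons (by omega)]
      rw [if_pos h, hd, pairView, hgi, hgi1]
      by_cases he : s[i] = s[i+1]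
      · simp [he]
      · rw [if_neg he, if_neg he, ih (s.length - (i+1)) (by omega) (i+1) rfl, hd']
    · rw [if_neg h, pairView.eq_def]
      have : s.drop i = [] ∨ ∃ a, s.drop i = [a] := by
        rcases hdi : s.drop i with _ | ⟨a, t⟩
        · exact Or.inl rfl
        · refine Or.inr ⟨a, ?_⟩
          have := congrArg List.length hdi
          simp only [List.length_drop, List.length_cons] at this
          have : t.length = 0 := by omega
          simp [List.length_eq_zero_iff.mp this] at hdi ⊢
      rcases this with h0 | ⟨a, h1⟩
      · simp [h0]
      · simp [h1]

-- on a ≤-sorted nonempty list, pairView is: none iff a duplicate, else the closed form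
theorem pairView_sorted (a : Int) (t : List Int)
    (hs : (a :: t).Pairwise (· ≤ ·)) (d : Int) :
    pairView (a :: t) d =
      if (a :: t).Nodup then
        some (d + (a :: t).getLast (by simp) - a - (t.length : Int)) else none := by
  induction t generalizing a d with
  | nil => simp [pairView]
  | cons b t ih =>
    rw [pairView]
    by_cases he : a = b
    · simp [he]
    · rw [if_neg he]
      have hs' : (b :: t).Pairwise (· ≤ ·) := hs.sublist (by simp)
      rw [ih b hs' (d + b - a - 1)]
      have hab : a < b := lt_of_le_of_ne ((List.pairwise_cons.mp hs).1 b (by simp)) he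
      have hnd : (a :: b :: t).Nodup ↔ (b :: t).Nodup := by
        constructor
        · exact fun h => h.sublist (by simp)
        · intro h
          refine List.nodup_cons.mpr ⟨?_, h⟩
          intro hmem
          have : b ≤ a := by
            rcases List.mem_cons.mp hmem with h1 | h1
            · omega
            · exact (List.pairwise_cons.mp hs').1 a h1
          omega
      by_cases h : (b :: t).Nodup
      · rw [if_pos h, if_pos (hnd.mpr h)]
        have hl : (a :: b :: t).getLast (by simp) = (b :: t).getLast (by simp) := by
          simp [List.getLast_cons]
        rw [hl]
        congr 1
        simp only [List.length_cons]
        push_cast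
        ring
      · rw [if_neg h, if_neg (fun hh => h (hnd.mp hh))]

theorem ofList_sublist {α : Type} [BEq α] [LawfulBEq α] (xs : List α) :
    (PySem.Set.ofList xs).Sublist xs := by
  induction xs using List.reverseRecOn with
  | nil => simp [PySem.Set.ofList]
  | append_singleton xs x ih =>
    rw [PySem.Set.ofList_append_singleton]
    by_cases h : x ∈ PySem.Set.ofList xs
    · rw [PySem.Set.add_of_mem h]
      exact ih.trans (by simp)
    · rw [PySem.Set.add_of_not_mem h]
      exact ih.append (by simp)

theorem ofList_length_eq_iff (xs : List Int) :
    (PySem.Set.ofList xs).length = xs.length ↔ xs.Nodup := by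
  constructor
  · intro h
    have := (ofList_sublist xs).eq_of_length h
    rw [← this]
    exact PySem.Set.nodup_ofList xs
  · intro h
    rw [PySem.Set.ofList_eq_self_of_nodup xs h]

-- removing one minimum is dropping the head of the sorted list
theorem erase_min_sorted (l : List Int) (m : Int)
    (hm : PySem.List.min? l (fun x => x) = some m) :
    PySem.List.sorted (l.erase m) (fun x => x) false =
      (PySem.List.sorted l (fun x => x) false).tail := by
  have hmem : m ∈ l := PySem.List.min?_mem hm
  have hne : l ≠ [] := by intro h; simp [h] at hmem
  rcases hs : PySem.List.sorted l (fun x => x) false with _ | ⟨h, t⟩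
  · exact absurd ((PySem.List.sorted_eq_nil_iff l _ false).mp hs) hne
  have hperm : (h :: t).Perm l := hs ▸ PySem.List.sorted_perm l _ false
  have hpw : (h :: t).Pairwise (· ≤ ·) := by
    have := PySem.List.sorted_pairwise l (fun x => x)
    rwa [hs] at this
  -- h = m : h is in l so m ≤ h; h is minimal among sorted = l so h ≤ m
  have hhm : h = m := by
    have h1 : m ≤ h := PySem.List.min?_isMin hm h (hperm.mem_iff.mp (by simp))
    have h2 : h ≤ m := by
      have := PySem.List.key_head_sorted_le (xs := l) (key := fun x => x) hs
      exact this m hmem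
    omega
  have hpermt : t.Perm (l.erase m) := by
    have := hperm.erase m
    rw [hhm] at this
    simpa using this
  have := PySem.List.sorted_id_eq_of_perm_of_pairwise (l.erase m) t hpermt
    (hpw.sublist (by simp))
  simp [this]

theorem removeMinsB_perm (k : Nat) (l : List Int) (hk : k ≤ l.length) :
    (removeMinsB k l).Perm ((PySem.List.sorted l (fun x => x) false).drop k) := by
  induction k generalizing l with
  | zero =>
    simpa using (PySem.List.sorted_perm l (fun x => x) false).symm
  | succ n ih =>
    have hne : l ≠ [] := by
      intro h; rw [h] at hk; simp at hk
    rcases hm : PySem.List.min? l (fun x => x) with _ | m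
    · exact absurd ((PySem.List.min?_eq_none_iff l _).mp hm) hne
    have hmem : m ∈ l := PySem.List.min?_mem hm
    rw [removeMinsB, hm]
    simp only [PySem.List.remove?_eq_some_erase l m hmem, Option.getD_some]
    have hlen : n ≤ (l.erase m).length := by
      rw [List.length_erase_of_mem hmem]; omega
    have h1 := ih (l.erase m) hlen
    rw [erase_min_sorted l m hm] at h1
    have : ((PySem.List.sorted l (fun x => x) false).tail).drop n =
        (PySem.List.sorted l (fun x => x) false).drop (n + 1) := by
      rw [← List.drop_one, List.drop_drop, Nat.add_comm]
    rwa [this] at h1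

-- on a ≤-sorted nonempty list the last element is maximal
theorem pairwise_le_getLast (l : List Int) (hpw : l.Pairwise (· ≤ ·)) (hne : l ≠ []) :
    ∀ y ∈ l, y ≤ l.getLast hne := by
  induction l with
  | nil => simp at hne
  | cons a t ih =>
    intro y hy
    cases t with
    | nil => simp at hy; simp [hy]
    | cons b t' =>
      have htne : (b :: t') ≠ ([] : List Int) := by simp
      have hl : (a :: b :: t').getLast hne = (b :: t').getLast htne := List.getLast_cons htne
      rcases List.mem_cons.mp hy with h1 | h1
      · subst h1
        have hmem : (b :: t').getLast htne ∈ (b :: t') := List.getLast_mem htne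
        have := (List.pairwise_cons.mp hpw).1 _ hmem
        omega
      · rw [hl]
        exact ih (List.pairwise_cons.mp hpw).2 htne y h1

-- ===== VERDICT (by name: the statement is the Claim_ definition above) =====
theorem judgePokers_spec : Claim_equal_judgePokers := by
  intro pokers _
  unfold Spec_judgePokers judgePokers judgePokers_alt
  have hpw0 := PySem.List.sorted_pairwise pokers (fun x => x)
  have hkcount : List.count 0 pokers =
      List.count 0 (PySem.List.sorted pokers (fun x => x) false) :=
    ((PySem.List.sorted_perm pokers (fun x => x) false).count_eq 0).symm
  simp only [countJokersA_eq, PySem.List.count_eq, gapLoopA_eq_pairView, hkcount]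
  set s := PySem.List.sorted pokers (fun x => x) false with hs
  set k := List.count 0 s with hk
  have hkle : k ≤ pokers.length := by
    have h1 : List.count 0 s ≤ s.length := List.count_le_length
    have h2 : s.length = pokers.length :=
      (PySem.List.sorted_perm pokers (fun x => x) false).length_eq
    omega
  have hperm : (removeMinsB k pokers).Perm (s.drop k) := removeMinsB_perm k pokers hkle
  set rest := removeMinsB k pokers with hrest
  set sub := s.drop k with hsub
  have hpw : sub.Pairwise (· ≤ ·) := hpw0.sublist (List.drop_sublist k s)
  rcases hsubc : sub with _ | ⟨a, t⟩
  · have hrnil : rest = [] := by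
      rw [hsubc] at hperm; exact List.eq_nil_of_length_eq_zero (by simpa using hperm.length_eq)
    simp [hrnil, pairView]
  · have hrne : rest ≠ [] := by
      intro h
      rw [h, hsubc] at hperm
      simpa using hperm.length_eq
    rw [hsubc] at hpw hperm
    rw [pairView_sorted a t hpw 0, if_neg hrne]
    have hndiff : rest.Nodup ↔ (a :: t).Nodup := hperm.nodup_iff
    by_cases hnd : (a :: t).Nodup
    · have hlen : (PySem.Set.ofList rest).length = rest.length :=
        (ofList_length_eq_iff rest).mpr (hndiff.mpr hnd)
      rw [if_pos hnd, if_neg (by simp [hlen])]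
      -- min/max of rest are head/getLast of the sorted sub
      rcases hmin : PySem.List.min? rest (fun x => x) with _ | mn
      · exact absurd ((PySem.List.min?_eq_none_iff rest _).mp hmin) hrne
      rcases hmax : PySem.List.max? rest (fun x => x) with _ | mx
      · exact absurd ((PySem.List.max?_eq_none_iff rest _).mp hmax) hrne
      have hsubne : (a :: t) ≠ ([] : List Int) := by simp
      have hmn : mn = a := by
        have h1 : mn ≤ a :=
          PySem.List.min?_isMin hmin a (hperm.mem_iff.mpr (by simp))
        have h2 : a ≤ mn := by
          have hmem : mn ∈ (a :: t) := hperm.mem_iff.mp (PySem.List.min?_mem hmin)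
          rcases List.mem_cons.mp hmem with h | h
          · omega
          · exact (List.pairwise_cons.mp hpw).1 mn h
        omega
      have hmx : mx = (a :: t).getLast hsubne := by
        have h1 : (a :: t).getLast hsubne ≤ mx :=
          PySem.List.max?_isMax hmax _ (hperm.mem_iff.mpr (List.getLast_mem hsubne))
        have h2 : mx ≤ (a :: t).getLast hsubne :=
          pairwise_le_getLast (a :: t) hpw hsubne mx
            (hperm.mem_iff.mp (PySem.List.max?_mem hmax))
        omega
      have hlr : rest.length = t.length + 1 := by simpa using hperm.length_eq
      rw [hmn, hmx, hlr]
      set G := (a :: t).getLast hsubne with hG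
      have harith : G - a - (((t.length + 1 : Nat) : Int) - 1) = 0 + G - a - (t.length : Int) := by
        push_cast; ring
      rw [Option.getD_some, Option.getD_some, harith]
      set D := 0 + G - a - (t.length : Int) with hD
      simp only []
      by_cases h0 : D = 0
      · simp [h0]
      · rw [if_neg h0]
        by_cases h1 : D = 1 ∧ 1 ≤ k
        · simp [h1.1, h1.2]
        · rw [if_neg h1]
          by_cases h2 : D = 2 ∧ k = 2
          · simp [h2.1, h2.2]
          · rw [if_neg h2]
            symm
            simp only [decide_eq_false_iff_not]
            rintro (hh | ⟨hh, hle⟩ | ⟨hh, he⟩)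
            · exact h0 hh
            · exact h1 ⟨hh, hle⟩
            · exact h2 ⟨hh, he⟩
    · rw [if_neg hnd]
      have : (PySem.Set.ofList rest).length ≠ rest.length := by
        intro h
        exact hnd (hndiff.mp ((ofList_length_eq_iff rest).mp h))
      rw [if_pos this]
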